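-- pv_equiv track=rewrite | github.com/LudvigOlsen/nattrs | nattrs/utils.py | replace_dots_in_regex
-- ===== SOURCE A (Python) =====
-- DOT_PLACEHOLDER = "[[DOT]]"  # Placeholder for dots inside regex terms
--
-- def replace_dots_in_regex(attr: str) -> str:
--     """Replace dots inside regex terms (inside `{}`) with a placeholder."""
--     result = []
--     inside_regex = False
--
--     for char in attr:
--         if char == "{":
--             inside_regex = True
--         elif char == "}":
--             inside_regex = False
--         if char == "." and inside_regex:
--             result.append(DOT_PLACEHOLDER)
--         else:
--             result.append(char)
--
--     return "".join(result)
-- ===== SOURCE B (Python) =====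
-- DOT_PLACEHOLDER = "[[DOT]]"  # Placeholder for dots inside regex terms
--
-- def replace_dots_in_regex(attr: str) -> str:
--     """Replace dots inside regex terms (inside `{}`) with a placeholder."""
--     if not attr:
--         return ""
--     i = attr.find("{")
--     if i == -1:
--         return attr
--     j = attr.find("}", i)
--     if j == -1:
--         return attr[:i] + attr[i:].replace(".", DOT_PLACEHOLDER)
--     return (attr[:i]
--             + attr[i:j + 1].replace(".", DOT_PLACEHOLDER)
--             + replace_dots_in_regex(attr[j + 1:]))
-- ===== Notes on version B (the rewrite author's own statement) =====
-- stated objective: simpler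
-- what changed: Replaced the per-character loop threading an inside-braces boolean through every character with a segment scanner: find the next opening brace, find its closing brace, do one local str.replace on that slice, and recurse on the remainder; bulk find/replace also avoids A's per-character list append and join.
import Mathlib
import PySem

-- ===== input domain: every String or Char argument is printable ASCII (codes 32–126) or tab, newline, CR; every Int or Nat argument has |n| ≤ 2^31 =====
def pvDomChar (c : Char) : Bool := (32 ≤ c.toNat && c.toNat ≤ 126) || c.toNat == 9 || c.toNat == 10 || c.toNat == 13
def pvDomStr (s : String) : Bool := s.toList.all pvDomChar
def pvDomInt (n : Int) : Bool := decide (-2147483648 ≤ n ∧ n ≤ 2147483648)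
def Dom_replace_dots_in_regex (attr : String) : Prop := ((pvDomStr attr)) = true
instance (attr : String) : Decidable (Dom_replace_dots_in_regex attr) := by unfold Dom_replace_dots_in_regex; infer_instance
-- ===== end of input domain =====

-- B replaces A's per-character boolean state machine by a segment scanner (find the next
-- '{' … '}' block, replace dots locally, recurse on the remainder); objective: simpler.

def DOT_PLACEHOLDER : String := "[[DOT]]"

-- ===== PORT A =====
-- the body of A's `for` loop: update `inside_regex`, then append placeholder or the char
def stepA (st : List String × Bool) (char : Char) : List String × Bool :=
  let inside_regex := if char = '{' then true else if char = '}' then false else st.2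
  if char = '.' ∧ inside_regex = true then (st.1 ++ [DOT_PLACEHOLDER], inside_regex)
  else (st.1 ++ [String.singleton char], inside_regex)

-- literal port of A: fold over the characters threading (result list, inside_regex flag), then join
def replace_dots_in_regex (attr : String) : String :=
  String.join (attr.toList.foldl stepA ([], false)).1

-- ===== PORT B =====
-- `attr[i:j+1].replace(".", DOT_PLACEHOLDER)` on the brace segment
def altReplaceDots (l : List Char) : List Char :=
  l.flatMap (fun c => if c = '.' then DOT_PLACEHOLDER.toList else [c])

-- port of B on the character list: `find("{")`/`find("}")` + slicing rendered as takeWhile/dropWhile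
def altGo (l : List Char) : List Char :=
  let pre := l.takeWhile (· ≠ '{')                    -- attr[:i]
  match h : l.dropWhile (· ≠ '{') with                -- attr[i:]  ([] = find returned -1)
  | [] => pre                                          -- no '{': return attr unchanged
  | brace :: r =>
    match h2 : (brace :: r).dropWhile (· ≠ '}') with   -- attr[j:]  ([] = find returned -1)
    | [] => pre ++ altReplaceDots (brace :: r)         -- unmatched '{': replace to end of string
    | _ :: tail =>                                     -- attr[i:j+1] = seg ++ ['}'], recurse on attr[j+1:]
      pre ++ altReplaceDots ((brace :: r).takeWhile (· ≠ '}') ++ ['}']) ++ altGo tail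
termination_by l.length
decreasing_by
  have hl : (l.dropWhile (· ≠ '{')).length ≤ l.length := List.length_dropWhile_le ..
  have hr : ((brace :: r).dropWhile (· ≠ '}')).length ≤ (brace :: r).length := List.length_dropWhile_le ..
  rw [h] at hl; rw [h2] at hr; simp at hl hr; omega

def replace_dots_in_regex_alt (attr : String) : String :=
  String.ofList (altGo attr.toList)

-- ===== PRECONDITION & SPEC =====
def Spec_replace_dots_in_regex (attr : String) (out : String) : Prop := out = replace_dots_in_regex_alt attr
instance (attr : String) (out : String) : Decidable (Spec_replace_dots_in_regex attr out) := by unfold Spec_replace_dots_in_regex; infer_instance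

-- ===== CLAIM (what is proved, stated in full; the proofs are below) =====
def Claim_equal_replace_dots_in_regex : Prop := ∀ (attr : String), Dom_replace_dots_in_regex attr → Spec_replace_dots_in_regex attr (replace_dots_in_regex attr)

-- ===== LEMMAS AND PROOFS =====

-- A's fold, abstracted: the list of string pieces A emits starting from flag `b`
def gA : Bool → List Char → List String
  | _, [] => []
  | b, c :: rest =>
    let ins := if c = '{' then true else if c = '}' then false else b
    (if c = '.' ∧ ins = true then DOT_PLACEHOLDER else String.singleton c) :: gA ins rest

lemma foldA (l : List Char) : ∀ (acc : List String) (b : Bool),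
    (l.foldl stepA (acc, b)).1 = acc ++ gA b l := by
  induction l with
  | nil => intro acc b; simp [gA]
  | cons c rest ih =>
    intro acc b
    simp only [List.foldl, gA, stepA]
    split_ifs <;> rw [ih] <;> simp

lemma join_toList (l : List String) : (String.join l).toList = l.flatMap String.toList := by
  have key : ∀ (l : List String) (s : String),
      (l.foldl (· ++ ·) s).toList = s.toList ++ l.flatMap String.toList := by
    intro l
    induction l with
    | nil => intro s; simp
    | cons a t ih => intro s; simp [List.foldl, ih, String.toList_append]
  have := key l ""
  simpa [List.flatMap] using this

lemma takeWhile_of_dropWhile_nil {p : Char → Bool} {l : List Char}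
    (h : List.dropWhile p l = []) : List.takeWhile p l = l := by
  have := List.takeWhile_append_dropWhile (p := p) (l := l)
  rw [h] at this; simpa using this

-- unfolding lemmas for altGo, one per branch
lemma altGo_nobrace (l : List Char) (h : l.dropWhile (· ≠ '{') = []) :
    altGo l = l.takeWhile (· ≠ '{') := by
  rw [altGo]
  split
  · rfl
  · rename_i brace r heq
    rw [h] at heq; cases heq

lemma altGo_unmatched (l : List Char) (brace : Char) (r : List Char)
    (h : l.dropWhile (· ≠ '{') = brace :: r)
    (h2 : (brace :: r).dropWhile (· ≠ '}') = []) :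
    altGo l = l.takeWhile (· ≠ '{') ++ altReplaceDots (brace :: r) := by
  rw [altGo]
  split
  · rename_i heq; rw [h] at heq; cases heq
  · rename_i brace' r' heq
    rw [h] at heq
    injection heq with e1 e2
    subst e1; subst e2
    split
    · rfl
    · rename_i c t heq2; rw [h2] at heq2; cases heq2

lemma altGo_matched (l : List Char) (brace : Char) (r : List Char) (c : Char) (t : List Char)
    (h : l.dropWhile (· ≠ '{') = brace :: r)
    (h2 : (brace :: r).dropWhile (· ≠ '}') = c :: t) :
    altGo l = l.takeWhile (· ≠ '{') ++
      (altReplaceDots ((brace :: r).takeWhile (· ≠ '}') ++ ['}']) ++ altGo t) := by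
  rw [altGo]
  split
  · rename_i heq; rw [h] at heq; cases heq
  · rename_i brace' r' heq
    rw [h] at heq
    injection heq with e1 e2
    subst e1; subst e2
    split
    · rename_i heq2; rw [h2] at heq2; cases heq2
    · rename_i c' t' heq2
      rw [h2] at heq2
      injection heq2 with e3 e4
      subst e4
      simp [List.append_assoc]

lemma altGo_cons_ne (c : Char) (rest : List Char) (hc : c ≠ '{') :
    altGo (c :: rest) = c :: altGo rest := by
  have hdw : (c :: rest).dropWhile (· ≠ '{') = rest.dropWhile (· ≠ '{') :=
    List.dropWhile_cons_of_pos (by simpa using hc)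
  have htw : (c :: rest).takeWhile (· ≠ '{') = c :: rest.takeWhile (· ≠ '{') :=
    List.takeWhile_cons_of_pos (by simpa using hc)
  cases hd : rest.dropWhile (· ≠ '{') with
  | nil =>
    rw [altGo_nobrace (c :: rest) (hdw.trans hd), altGo_nobrace rest hd, htw]
  | cons b r =>
    cases h2 : (b :: r).dropWhile (· ≠ '}') with
    | nil =>
      rw [altGo_unmatched (c :: rest) b r (hdw.trans hd) h2,
        altGo_unmatched rest b r hd h2, htw]
      simp
    | cons d t =>
      rw [altGo_matched (c :: rest) b r d t (hdw.trans hd) h2,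
        altGo_matched rest b r d t hd h2, htw]
      simp

-- what A emits with the flag ON equals B's local replacement up to the closing '}';
-- with the flag OFF it equals B's segment scanner
lemma gA_alt (n : ℕ) : ∀ l : List Char, l.length ≤ n →
    ((gA true l).flatMap String.toList =
      altReplaceDots (l.takeWhile (· ≠ '}')) ++
        (match l.dropWhile (· ≠ '}') with
         | [] => []
         | _ :: t => '}' :: altGo t)) ∧
    (gA false l).flatMap String.toList = altGo l := by
  induction n with
  | zero =>
    intro l hl
    have : l = [] := List.eq_nil_of_length_eq_zero (Nat.le_zero.mp hl)
    subst this
    refine ⟨by simp [gA, altReplaceDots], ?_⟩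
    rw [altGo_nobrace [] (by simp)]; simp [gA]
  | succ n ih =>
    intro l hl
    cases l with
    | nil =>
      refine ⟨by simp [gA, altReplaceDots], ?_⟩
      rw [altGo_nobrace [] (by simp)]; simp [gA]
    | cons c rest =>
      have hrest : rest.length ≤ n := by simpa using hl
      obtain ⟨ihT, ihF⟩ := ih rest hrest
      constructor
      · -- flag ON
        by_cases hc : c = '}'
        · subst hc
          have htw : ('}' :: rest).takeWhile (· ≠ '}') = [] :=
            List.takeWhile_cons_of_neg (by simp)
          have hdw : ('}' :: rest).dropWhile (· ≠ '}') = '}' :: rest :=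
            List.dropWhile_cons_of_neg (by simp)
          rw [htw, hdw]
          simp only [gA]
          norm_num
          simp [altReplaceDots, ihF, String.toList_singleton]
        · have htw : (c :: rest).takeWhile (· ≠ '}') = c :: rest.takeWhile (· ≠ '}') :=
            List.takeWhile_cons_of_pos (by simpa using hc)
          have hdw : (c :: rest).dropWhile (· ≠ '}') = rest.dropWhile (· ≠ '}') :=
            List.dropWhile_cons_of_pos (by simpa using hc)
          rw [htw, hdw]
          have hins : (if c = '{' then true else if c = '}' then false else true) = true := by
            simp [hc]
          simp only [gA, hins]
          by_cases hd : c = '.'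
          · subst hd; simp [altReplaceDots, ihT, String.toList_singleton]
          · simp [altReplaceDots, ihT, hd, String.toList_singleton]
      · -- flag OFF
        by_cases hc : c = '{'
        · subst hc
          have hdw : ('{' :: rest).dropWhile (· ≠ '{') = '{' :: rest :=
            List.dropWhile_cons_of_neg (by simp)
          have htw : ('{' :: rest).takeWhile (· ≠ '{') = [] :=
            List.takeWhile_cons_of_neg (by simp)
          have htw2 : ('{' :: rest).takeWhile (· ≠ '}') = '{' :: rest.takeWhile (· ≠ '}') :=
            List.takeWhile_cons_of_pos (by simp)
          have hdw2 : ('{' :: rest).dropWhile (· ≠ '}') = rest.dropWhile (· ≠ '}') :=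
            List.dropWhile_cons_of_pos (by simp)
          simp only [gA]
          norm_num
          cases h2 : rest.dropWhile (· ≠ '}') with
          | nil =>
            rw [altGo_unmatched ('{' :: rest) '{' rest hdw (hdw2.trans h2), htw]
            have hseg : rest.takeWhile (· ≠ '}') = rest := takeWhile_of_dropWhile_nil h2
            rw [ihT, h2, hseg]
            simp [altReplaceDots, String.toList_singleton]
          | cons b t =>
            rw [altGo_matched ('{' :: rest) '{' rest b t hdw (hdw2.trans h2), htw, htw2]
            rw [ihT, h2]
            simp [altReplaceDots, String.toList_singleton]
        · have hins : (if c = '{' then true else if c = '}' then false else false) = false := by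
            simp [hc]
          have hne : ¬ (c = '.' ∧ (if c = '{' then true else if c = '}' then false else false) = true) := by
            rw [hins]; rintro ⟨_, h⟩; exact Bool.false_ne_true h
          simp only [gA, hne, hins, if_neg hne]
          rw [altGo_cons_ne c rest hc]
          simp [ihF, String.toList_singleton]

-- ===== VERDICT (by name: the statement is the Claim_ definition above) =====
theorem replace_dots_in_regex_spec : Claim_equal_replace_dots_in_regex := by
  intro attr _
  unfold Spec_replace_dots_in_regex replace_dots_in_regex replace_dots_in_regex_alt
  apply String.toList_inj.mp
  rw [join_toList, String.toList_ofList]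
  rw [foldA attr.toList [] false]
  simpa using (gA_alt attr.toList.length attr.toList le_rfl).2
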